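-- pv_equiv track=rewrite | github.com/jaaw1/AdventOfCode | matrix_testing.py | merge_contiguous_digits
-- ===== SOURCE A (Python) =====
-- def merge_contiguous_digits(row):
--     merged_cells = []
--     merged_number = ''
--     for cell in row:
--         if cell.isdigit():
--             merged_cells.append(cell)
--             merged_number += cell
--         elif merged_cells:
--             # If consecutive digits end, merge them into a single number
--             merged_number = int(merged_number)
--             yield merged_cells, merged_number
--             merged_cells = []
--             merged_number = ''
--     if merged_cells:
--         # If the row ends with consecutive digits, merge them
--         merged_number = int(merged_number)
--         yield merged_cells, merged_number
-- ===== SOURCE B (Python) =====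
-- def merge_contiguous_digits(row):
--     # index scan: skip non-digit cells; on a digit cell, advance j to the end of
--     # the contiguous digit run, emit the run once, and jump past it
--     n = len(row)
--     i = 0
--     while i < n:
--         if row[i].isdigit():
--             j = i
--             while j < n and row[j].isdigit():
--                 j += 1
--             cells = row[i:j]
--             yield cells, int(''.join(cells))
--             i = j
--         else:
--             i += 1
-- ===== Notes on version B (the rewrite author's own statement) =====
-- stated objective: alternative
-- what changed: B replaces A's cell-by-cell accumulator with an end-of-run flush branch by a run-scanning traversal: it finds each whole contiguous digit run with an inner scan, slices it out and emits it in one step, keeping no pending state.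
import Mathlib
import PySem

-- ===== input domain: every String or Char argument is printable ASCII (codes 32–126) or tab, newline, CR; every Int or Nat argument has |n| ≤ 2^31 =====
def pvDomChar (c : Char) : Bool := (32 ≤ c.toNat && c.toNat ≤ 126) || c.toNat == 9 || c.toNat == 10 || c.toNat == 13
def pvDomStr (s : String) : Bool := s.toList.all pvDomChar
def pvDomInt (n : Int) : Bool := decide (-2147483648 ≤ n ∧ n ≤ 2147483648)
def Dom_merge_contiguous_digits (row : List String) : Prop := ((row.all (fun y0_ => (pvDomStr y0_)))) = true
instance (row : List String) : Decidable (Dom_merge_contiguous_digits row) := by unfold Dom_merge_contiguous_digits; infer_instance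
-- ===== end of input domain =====

-- B groups each contiguous digit run in one scan instead of A's pending accumulator + flush branch; same cost, different traversal. Equivalence of the yielded sequences (as lists) is proved for all inputs.

-- ===== PORT A =====
-- state = (merged_cells, merged_number as List Char, yielded output so far);
-- int(merged_number) → PySem.Int.ofChars?; `.getD 0` is only syntactic totalisation:
-- whenever it is evaluated the accumulator is a nonempty digit string, so ofChars? = some _.
def merge_contiguous_digits (row : List String) : List (List String × Int) :=
  let st := row.foldl
    (fun (st : List String × List Char × List (List String × Int)) cell =>
      if PySem.Str.strIsdigit cell then
        (st.1 ++ [cell], st.2.1 ++ cell.toList, st.2.2)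
      else if st.1 ≠ [] then
        ([], [], st.2.2 ++ [(st.1, (PySem.Int.ofChars? st.2.1).getD 0)])
      else st)
    ([], [], [])
  if st.1 ≠ [] then st.2.2 ++ [(st.1, (PySem.Int.ofChars? st.2.1).getD 0)] else st.2.2

-- ===== PORT B =====
-- Source B's index scan: the inner `while j < n and row[j].isdigit()` is takeWhile on the
-- current suffix, `cells = row[i:j]` is that run, `i = j` is dropWhile; ''.join → Chars.join [].
def merge_contiguous_digits_alt : List String → List (List String × Int)
  | [] => []
  | c :: r =>
    if PySem.Str.strIsdigit c then
      let run := c :: r.takeWhile PySem.Str.strIsdigit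
      (run, (PySem.Int.ofChars? (PySem.Chars.join [] (run.map String.toList))).getD 0)
        :: merge_contiguous_digits_alt (r.dropWhile PySem.Str.strIsdigit)
    else merge_contiguous_digits_alt r
termination_by row => row.length
decreasing_by
  · simpa using Nat.lt_succ_of_le (List.length_dropWhile_le _ _)
  · simp

-- ===== PRECONDITION & SPEC =====
def Spec_merge_contiguous_digits (row : List String) (out : List (List String × Int)) : Prop := out = merge_contiguous_digits_alt row
instance (row : List String) (out : List (List String × Int)) : Decidable (Spec_merge_contiguous_digits row out) := by unfold Spec_merge_contiguous_digits; infer_instance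

-- ===== CLAIM (what is proved, stated in full; the proofs are below) =====
def Claim_equal_merge_contiguous_digits : Prop := ∀ (row : List String), Dom_merge_contiguous_digits row → Spec_merge_contiguous_digits row (merge_contiguous_digits row)

-- ===== LEMMAS AND PROOFS =====

-- mid-loop meaning of A's state: pending cells/number, then the rest of the row
def pvH (cells : List String) (num : List Char) : List String → List (List String × Int)
  | [] => if cells = [] then [] else [(cells, (PySem.Int.ofChars? num).getD 0)]
  | c :: r =>
    if PySem.Str.strIsdigit c then pvH (cells ++ [c]) (num ++ c.toList) r
    else if cells = [] then pvH cells num r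
    else (cells, (PySem.Int.ofChars? num).getD 0) :: pvH [] [] r

lemma pvJoin_nil_cons (x : List Char) (xs : List (List Char)) :
    PySem.Chars.join [] (x :: xs) = x ++ PySem.Chars.join [] xs := by
  cases xs with
  | nil => simp [PySem.Chars.join, List.intercalate]
  | cons y ys => simp [PySem.Chars.join_cons_cons]

lemma pvAlt_cons_pos (c : String) (r : List String) (h : PySem.Str.strIsdigit c = true) :
    merge_contiguous_digits_alt (c :: r) =
      (c :: r.takeWhile PySem.Str.strIsdigit,
        (PySem.Int.ofChars? (PySem.Chars.join []
          ((c :: r.takeWhile PySem.Str.strIsdigit).map String.toList))).getD 0)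
        :: merge_contiguous_digits_alt (r.dropWhile PySem.Str.strIsdigit) := by
  rw [merge_contiguous_digits_alt.eq_def]
  simp [show PySem.Chars.strIsdigit c.toList = true from by simpa [PySem.Str.strIsdigit] using h]

lemma pvAlt_cons_neg (c : String) (r : List String) (h : PySem.Str.strIsdigit c = false) :
    merge_contiguous_digits_alt (c :: r) = merge_contiguous_digits_alt r := by
  rw [merge_contiguous_digits_alt.eq_def]
  simp [show PySem.Chars.strIsdigit c.toList = false from by simpa [PySem.Str.strIsdigit] using h]

lemma pvA_fold (row : List String) : ∀ (cells : List String) (num : List Char)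
    (acc : List (List String × Int)),
    (let st := row.foldl
      (fun (st : List String × List Char × List (List String × Int)) cell =>
        if PySem.Str.strIsdigit cell then
          (st.1 ++ [cell], st.2.1 ++ cell.toList, st.2.2)
        else if st.1 ≠ [] then
          ([], [], st.2.2 ++ [(st.1, (PySem.Int.ofChars? st.2.1).getD 0)])
        else st)
      (cells, num, acc);
     if st.1 ≠ [] then st.2.2 ++ [(st.1, (PySem.Int.ofChars? st.2.1).getD 0)] else st.2.2)
      = acc ++ pvH cells num row := by
  induction row with
  | nil =>
    intro cells num acc
    by_cases h : cells = [] <;> simp [pvH, h]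
  | cons c rs ih =>
    intro cells num acc
    by_cases hd : PySem.Str.strIsdigit c
    · have hdc : PySem.Chars.strIsdigit c.toList = true := by
        simpa [PySem.Str.strIsdigit] using hd
      simpa [pvH, hd, hdc] using ih (cells ++ [c]) (num ++ c.toList) acc
    · have hdc : PySem.Chars.strIsdigit c.toList = false := by
        simpa [PySem.Str.strIsdigit] using (by simpa using hd : PySem.Str.strIsdigit c = false)
      by_cases hc : cells = []
      · subst hc
        simpa [pvH, hd, hdc] using ih [] num acc
      · simpa [pvH, hd, hdc, hc] using ih [] [] (acc ++ [(cells, (PySem.Int.ofChars? num).getD 0)])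

lemma pvH_spec : ∀ (n : Nat) (r : List String), r.length ≤ n →
    (pvH [] [] r = merge_contiguous_digits_alt r) ∧
    (∀ (cells : List String) (num : List Char), cells ≠ [] →
      pvH cells num r =
        (cells ++ r.takeWhile PySem.Str.strIsdigit,
          (PySem.Int.ofChars? (num ++ PySem.Chars.join []
            ((r.takeWhile PySem.Str.strIsdigit).map String.toList))).getD 0)
          :: merge_contiguous_digits_alt (r.dropWhile PySem.Str.strIsdigit)) := by
  intro n
  induction n with
  | zero =>
    intro r hr
    have : r = [] := List.length_eq_zero_iff.mp (Nat.le_zero.mp hr)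
    subst this
    refine ⟨by simp [pvH, merge_contiguous_digits_alt], ?_⟩
    intro cells num hc
    simp [pvH, hc, PySem.Chars.join_nil, merge_contiguous_digits_alt]
  | succ n ih =>
    intro r hr
    cases r with
    | nil =>
      refine ⟨by simp [pvH, merge_contiguous_digits_alt], ?_⟩
      intro cells num hc
      simp [pvH, hc, PySem.Chars.join_nil, merge_contiguous_digits_alt]
    | cons c rs =>
      have hrs : rs.length ≤ n := by simpa using Nat.lt_succ_iff.mp (Nat.lt_of_lt_of_le (by simp) hr)
      constructor
      · by_cases hd : PySem.Str.strIsdigit c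
        · have hdc : PySem.Chars.strIsdigit c.toList = true := by
            simpa [PySem.Str.strIsdigit] using hd
          have h2 := (ih rs hrs).2 [c] c.toList (by simp)
          simp only [pvH, hd, hdc, if_true, List.nil_append] at h2 ⊢
          rw [h2, pvAlt_cons_pos c rs hd]
          simp [pvJoin_nil_cons]
        · have hd' : PySem.Str.strIsdigit c = false := by
            simpa using hd
          have hdc : PySem.Chars.strIsdigit c.toList = false := by
            simpa [PySem.Str.strIsdigit] using hd'
          have h1 := (ih rs hrs).1
          rw [pvAlt_cons_neg c rs hd']
          simpa [pvH, hd', hdc] using h1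
      · intro cells num hc
        by_cases hd : PySem.Str.strIsdigit c
        · have hdc : PySem.Chars.strIsdigit c.toList = true := by
            simpa [PySem.Str.strIsdigit] using hd
          have h2 := (ih rs hrs).2 (cells ++ [c]) (num ++ c.toList) (by simp)
          simp only [pvH, hd, hdc, if_true] at h2 ⊢
          rw [h2]
          simp [List.takeWhile_cons_of_pos hd, List.dropWhile_cons_of_pos hd,
            pvJoin_nil_cons, List.append_assoc]
        · have hd' : PySem.Str.strIsdigit c = false := by simpa using hd
          have hdc : PySem.Chars.strIsdigit c.toList = false := by
            simpa [PySem.Str.strIsdigit] using hd'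
          have h1 := (ih rs hrs).1
          rw [List.takeWhile_cons_of_neg (by simp [hdc]), List.dropWhile_cons_of_neg (by simp [hdc]),
            pvAlt_cons_neg c rs hd']
          simp [pvH, hd', hdc, hc, h1, PySem.Chars.join_nil]

-- ===== VERDICT (by name: the statement is the Claim_ definition above) =====
theorem merge_contiguous_digits_spec : Claim_equal_merge_contiguous_digits := by
  intro row _
  unfold Spec_merge_contiguous_digits merge_contiguous_digits
  have hA := pvA_fold row [] [] []
  simp only [List.nil_append] at hA
  rw [hA]
  exact (pvH_spec row.length row le_rfl).1
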